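-- pv_equiv track=rewrite | github.com/Jumner/compSci | python/biostuff/cross.py | pheno
-- ===== SOURCE A (Python) =====
-- def pheno(geno):
-- 	phenoList = []
-- 	for i in range(0,len(geno),2):
-- 		phenoStr = ""
-- 		for c in geno[i:i+2]:
-- 			if not phenoStr:
-- 				if c.isupper():
-- 					phenoStr += c
-- 				else:
-- 					phenoStr = c
-- 		phenoList.append(phenoStr)
-- 	return phenoList
-- ===== SOURCE B (Python) =====
-- def pheno(geno):
--     # every block of 2 contributes exactly its first character, so the whole
--     # computation is the step-2 slice taken as a list of 1-char strings
--     return [c for c in geno[::2]]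
-- ===== Notes on version B (the rewrite author's own statement) =====
-- stated objective: simpler
-- what changed: A's nested loop over 2-char blocks with an isupper branch (both branches yield the block's first character) is replaced by a single step-2 slice geno[::2] listed as 1-char strings; no loop over pairs, no classification.
import Mathlib
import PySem

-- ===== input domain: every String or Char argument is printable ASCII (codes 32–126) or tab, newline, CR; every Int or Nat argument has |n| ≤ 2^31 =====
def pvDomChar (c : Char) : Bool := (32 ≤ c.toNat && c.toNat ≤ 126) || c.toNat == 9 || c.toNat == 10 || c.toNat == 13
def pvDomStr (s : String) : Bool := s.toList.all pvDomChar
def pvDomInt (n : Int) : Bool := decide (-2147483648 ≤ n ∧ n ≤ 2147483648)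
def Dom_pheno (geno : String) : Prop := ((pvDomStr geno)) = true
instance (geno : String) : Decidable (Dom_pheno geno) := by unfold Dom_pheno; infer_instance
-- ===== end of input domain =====

-- B replaces A's nested block loop (whose isupper branch is irrelevant) by the step-2 slice
-- geno[::2] listed as 1-char strings: simpler, same O(n) cost.

-- ===== PORT A =====
-- inner loop: builds phenoStr from a 2-char block, character by character
def phenoInner (block : List Char) : List Char :=
  block.foldl (fun phenoStr c =>
    if phenoStr.isEmpty then
      (if PySem.Chars.isupper c then phenoStr ++ [c] else [c])
    else phenoStr) []

def pheno (geno : String) : List String :=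
  (PySem.List.pyRange 0 (PySem.Str.len geno) 2).foldl
    (fun phenoList i =>
      phenoList ++ [String.ofList (phenoInner (PySem.List.slice geno.toList (some i) (some (i + 2))))]) []

-- ===== PORT B =====
def pheno_alt (geno : String) : List String :=
  ((PySem.List.slice? geno.toList none none 2).getD []).map (fun c => String.ofList [c])

-- ===== PRECONDITION & SPEC =====
def Spec_pheno (geno : String) (out : List String) : Prop := out = pheno_alt geno
instance (geno : String) (out : List String) : Decidable (Spec_pheno geno out) := by unfold Spec_pheno; infer_instance

-- ===== CLAIM (what is proved, stated in full; the proofs are below) =====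
def Claim_equal_pheno : Prop := ∀ (geno : String), Dom_pheno geno → Spec_pheno geno (pheno geno)

-- ===== LEMMAS AND PROOFS =====

-- on any nonempty block the inner loop returns the first character
lemma phenoInner_cons (c : Char) (t : List Char) : phenoInner (c :: t) = [c] := by
  have h : ∀ (u : List Char) (acc : List Char), acc.isEmpty = false →
      u.foldl (fun s x =>
        if s.isEmpty then (if PySem.Chars.isupper x then s ++ [x] else [x]) else s) acc = acc := by
    intro u
    induction u with
    | nil => intro acc _; rfl
    | cons x xs ih =>
      intro acc hacc
      rw [List.foldl_cons]
      have hstep : (if acc.isEmpty then (if PySem.Chars.isupper x then acc ++ [x] else [x]) else acc) = acc := by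
        simp [hacc]
      rw [hstep]
      exact ih acc hacc
  unfold phenoInner
  rw [List.foldl_cons]
  have h0 : (if ([] : List Char).isEmpty then
      (if PySem.Chars.isupper c then ([] : List Char) ++ [c] else [c]) else []) = [c] := by simp
  rw [h0]
  exact h t [c] rfl

-- both sides as maps over the same index range
lemma main_lemma (cs : List Char) (cnt : ℕ) (h : ∀ k < cnt, 2 * k < cs.length) :
    (List.range cnt).map
        (fun k => String.ofList (phenoInner (List.take 2 (List.drop (2 * k) cs)))) =
    (List.filterMap (fun k : ℕ => cs[2 * k]?) (List.range cnt)).map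
        (fun c => String.ofList [c]) := by
  induction cnt with
  | zero => simp
  | succ m ih =>
    have hm : 2 * m < cs.length := h m (Nat.lt_succ_self m)
    rw [List.range_succ, List.map_append, List.filterMap_append, List.map_append,
      ih (fun k hk => h k (Nat.lt_succ_of_lt hk))]
    simp only [List.map_cons, List.map_nil, List.filterMap_cons, List.filterMap_nil,
      List.getElem?_eq_getElem hm]
    rw [List.drop_eq_getElem_cons hm]
    rw [show List.take 2 (cs[2 * m] :: List.drop (2 * m + 1) cs)
        = cs[2 * m] :: List.take 1 (List.drop (2 * m + 1) cs) from rfl]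
    rw [phenoInner_cons]

-- ===== VERDICT (by name: the statement is the Claim_ definition above) =====
theorem pheno_spec : Claim_equal_pheno := by
  intro geno _
  show pheno geno = pheno_alt geno
  unfold pheno pheno_alt
  rw [PySem.Str.len_eq, PySem.List.foldl_append_singleton_eq_map,
    PySem.List.pyRange_of_pos 0 _ (by norm_num : (0:ℤ) < 2)]
  set cs := geno.toList with hcs
  norm_num [PySem.List.slice?, PySem.List.sliceIndices]
  set cnt : ℕ := if 0 < cs.length then (((cs.length : ℤ) + 2 - 1) / 2).toNat else 0 with hcnt
  have hbound : ∀ k < cnt, 2 * k < cs.length := by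
    intro k hk
    rw [hcnt] at hk
    split at hk <;> omega
  calc (List.range cnt).map ((fun i => String.ofList (phenoInner (PySem.List.slice cs (some i) (some (i + 2))))) ∘ (fun k : ℕ => 2 * (k : ℤ)))
      = (List.range cnt).map (fun k : ℕ => String.ofList (phenoInner (List.take 2 (List.drop (2 * k) cs)))) := by
        apply List.map_congr_left
        intro k _
        simp only [Function.comp_apply]
        rw [show (2 * (k : ℤ)) = ((2 * k : ℕ) : ℤ) by push_cast; ring,
          show ((2 * k : ℕ) : ℤ) + 2 = ((2 * k : ℕ) : ℤ) + ((2 : ℕ) : ℤ) by norm_num,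
          PySem.List.slice_natCast_add]
    _ = (List.filterMap (fun k : ℕ => cs[2 * k]?) (List.range cnt)).map (fun c => String.ofList [c]) :=
        main_lemma cs cnt hbound
    _ = (List.filterMap (fun k : ℕ => cs[(2 * (k : ℤ)).toNat]?) (List.range cnt)).map (fun c => String.ofList [c]) := by
        congr 1
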